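-- pv_equiv track=rewrite | github.com/queryharada/PyCharm | MIT/m090301.py | iniToStr
-- ===== SOURCE A (Python) =====
-- def iniToStr(i):
--     digits = '0123456789'
--     if i == 0:
--         return '0'
--     result = ''
--     while i > 0:
--         result = digits[i % 10] + result
--         i = i // 10
--     return result
-- ===== SOURCE B (Python) =====
-- def iniToStr(i):
--     digits = '0123456789'
--
--     def ndigits(n, k):
--         # smallest k' >= k with 10 ** k' > n
--         if 10 ** k <= n:
--             return ndigits(n, k + 1)
--         return k
--
--     if i == 0:
--         return '0'
--     d = ndigits(i, 0)
--     return ''.join(digits[(i // 10 ** (d - 1 - k)) % 10] for k in range(d))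
-- ===== Notes on version B (the rewrite author's own statement) =====
-- stated objective: alternative
-- what changed: Instead of A's while-loop that peels digits off the low end and prepends each to a string accumulator, B first computes the digit count d (smallest k with 10**k > i) and then emits the digits left-to-right positionally, indexing digit k as (i // 10**(d-1-k)) % 10 over range(d), with no accumulator and no mutation of i.
import Mathlib
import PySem

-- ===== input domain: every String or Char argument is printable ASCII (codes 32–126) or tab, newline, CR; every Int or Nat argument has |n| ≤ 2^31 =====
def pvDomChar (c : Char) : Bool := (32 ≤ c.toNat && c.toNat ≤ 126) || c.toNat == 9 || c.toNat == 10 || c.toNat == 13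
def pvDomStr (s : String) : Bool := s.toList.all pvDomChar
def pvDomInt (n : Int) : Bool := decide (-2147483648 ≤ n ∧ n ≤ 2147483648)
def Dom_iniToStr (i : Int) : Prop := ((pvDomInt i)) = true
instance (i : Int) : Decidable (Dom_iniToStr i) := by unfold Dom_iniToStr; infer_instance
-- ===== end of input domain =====

-- B replaces A's low-end digit-peeling loop with a string accumulator by a positional
-- left-to-right rendering: it first counts the digits d and then indexes digit k directly
-- as (i // 10**(d-1-k)) % 10 over range(d); same values, alternative algorithm.

-- ===== PORT A =====
-- while i > 0: result = digits[i % 10] + result; i = i // 10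
-- (the index i % 10 is always 0..9 for the positive divisor 10, so .getD '0' is never used)
def iniToStrLoop (i : Int) (result : List Char) : List Char :=
  if 0 < i then
    iniToStrLoop (PySem.Int.floordiv i 10)
      (((PySem.List.pyGet? "0123456789".toList (PySem.Int.mod i 10)).getD '0') :: result)
  else result
termination_by i.toNat
decreasing_by
  rw [PySem.Int.floordiv_eq_ediv_of_pos (by omega : (0:Int) < 10)]
  omega

def iniToStr (i : Int) : String :=
  if i = 0 then "0"
  else String.mk (iniToStrLoop i [])

-- ===== PORT B =====
-- ndigits(n, k): smallest k' >= k with 10 ** k' > n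
def iniToStrCount (n : Int) (k : Nat) : Nat :=
  if (10:Int)^k ≤ n then iniToStrCount n (k+1) else k
termination_by (n + 1 - (10:Int)^k).toNat
decreasing_by
  have h1 : (0:Int) < 10^k := pow_pos (by omega) k
  omega

def iniToStr_alt (i : Int) : String :=
  if i = 0 then "0"
  else
    let d := iniToStrCount i 0
    String.mk ((List.range d).map (fun k =>
      (PySem.List.pyGet? "0123456789".toList
        (PySem.Int.mod (PySem.Int.floordiv i ((10:Int)^(d - 1 - k))) 10)).getD '0'))

-- ===== PRECONDITION & SPEC =====
def Spec_iniToStr (i : Int) (out : String) : Prop := out = iniToStr_alt i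
instance (i : Int) (out : String) : Decidable (Spec_iniToStr i out) := by unfold Spec_iniToStr; infer_instance

-- ===== CLAIM (what is proved, stated in full; the proofs are below) =====
def Claim_equal_iniToStr : Prop := ∀ (i : Int), Dom_iniToStr i → Spec_iniToStr i (iniToStr i)

-- ===== LEMMAS AND PROOFS =====
theorem count_shift (i : Int) (k : Nat) :
    iniToStrCount i (k+1) = iniToStrCount (i / 10) k + 1 := by
  have hiff : ((10:Int)^k ≤ i / 10) ↔ ((10:Int)^(k+1) ≤ i) := by
    rw [Int.le_ediv_iff_mul_le (by omega : (0:Int) < 10), ← pow_succ]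
  conv_lhs => rw [iniToStrCount]
  conv_rhs => rw [iniToStrCount]
  by_cases h : (10:Int)^(k+1) ≤ i
  · rw [if_pos h, if_pos (hiff.mpr h), count_shift i (k+1)]
  · rw [if_neg h, if_neg (fun hc => h (hiff.mp hc))]
termination_by (i + 1 - (10:Int)^(k+1)).toNat
decreasing_by
  have h1 : (0:Int) < 10^(k+1) := pow_pos (by omega) (k+1)
  omega

theorem count_pos_step (i : Int) (hi : 0 < i) :
    iniToStrCount i 0 = iniToStrCount (i / 10) 0 + 1 := by
  rw [iniToStrCount, if_pos (by simpa using hi)]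
  exact count_shift i 0

theorem count_nonpos (i : Int) (hi : i ≤ 0) : iniToStrCount i 0 = 0 := by
  rw [iniToStrCount, if_neg (by simpa using by omega : ¬ (10:Int)^0 ≤ i)]

theorem loop_eq_rangeMap (i : Int) (res : List Char) (hi : 0 < i) :
    iniToStrLoop i res =
      (List.range (iniToStrCount i 0)).map (fun k =>
        (PySem.List.pyGet? "0123456789".toList
          (PySem.Int.mod (PySem.Int.floordiv i ((10:Int)^(iniToStrCount i 0 - 1 - k))) 10)).getD '0')
        ++ res := by
  have h10 : (0:Int) < 10 := by omega
  have hd : iniToStrCount i 0 = iniToStrCount (i / 10) 0 + 1 := count_pos_step i hi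
  set d' := iniToStrCount (i / 10) 0 with hd'
  rw [iniToStrLoop, if_pos hi, PySem.Int.floordiv_eq_ediv_of_pos h10, hd]
  by_cases hq : 0 < i / 10
  · rw [loop_eq_rangeMap (i / 10) _ hq, ← hd',
        List.range_succ, List.map_append, List.append_assoc]
    congr 1
    · apply List.map_congr_left
      intro k hk
      have hk' : k < d' := List.mem_range.mp hk
      have harg : PySem.Int.floordiv (i / 10) ((10:Int)^(d' - 1 - k)) =
          PySem.Int.floordiv i ((10:Int)^(d' + 1 - 1 - k)) := by
        rw [show d' + 1 - 1 - k = (d' - 1 - k) + 1 from by omega,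
            PySem.Int.floordiv_eq_ediv_of_pos (pow_pos (by omega : (0:Int) < 10) _),
            PySem.Int.floordiv_eq_ediv_of_pos (pow_pos (by omega : (0:Int) < 10) _),
            Int.ediv_ediv_eq_ediv_mul (by omega : (0:Int) ≤ 10), ← pow_succ']
      rw [harg]
    · simp only [List.map_cons, List.map_nil, List.singleton_append]
      rw [show d' + 1 - 1 - d' = 0 from by omega, pow_zero,
          PySem.Int.floordiv_eq_ediv_of_pos (by omega : (0:Int) < 1), Int.ediv_one]
  · have hz : i / 10 = 0 := by
      have : 0 ≤ i / 10 := Int.ediv_nonneg (by omega) (by omega)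
      omega
    have hd0 : d' = 0 := by rw [hd', hz]; exact count_nonpos 0 (by omega)
    rw [iniToStrLoop, if_neg hq, hd0]
    simp [List.range_succ]
termination_by i.toNat
decreasing_by omega

-- ===== VERDICT (by name: the statement is the Claim_ definition above) =====
theorem iniToStr_spec : Claim_equal_iniToStr := by
  intro i _
  unfold Spec_iniToStr iniToStr iniToStr_alt
  by_cases h0 : i = 0
  · simp [h0]
  · rw [if_neg h0, if_neg h0]
    by_cases hp : 0 < i
    · rw [loop_eq_rangeMap i [] hp, List.append_nil]
    · rw [iniToStrLoop, if_neg hp, count_nonpos i (by omega)]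
      simp
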